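-- pv_equiv track=rewrite | github.com/matuspintek-boop/ib111 | sol/02.r3_delete.py | delete_to_maximal
-- ===== SOURCE A (Python) =====
-- def delete_to_maximal(number):
--     result = 0
--     power = 1
--     while number // power > 0:
--         candidate = number // (power * 10) * power + number % power
--         power *= 10
--         if result < candidate:
--             result = candidate
--     return result
-- ===== SOURCE B (Python) =====
-- def delete_to_maximal(number):
--     # Recursive formulation: the best single-digit deletion of n either drops
--     # the last digit (n // 10) or drops a digit of n // 10 and re-appends the
--     # last digit.  Numbers below 10 (incl. 0 and negatives) give 0, like A.
--     if number < 10: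
--         return 0
--     return max(number // 10, delete_to_maximal(number // 10) * 10 + number % 10)
-- ===== Notes on version B (the rewrite author's own statement) =====
-- stated objective: simpler
-- what changed: Replaces A's iterative enumeration of every delete-one-digit candidate (a while loop maintaining a growing power of ten, a candidate built from div/mod arithmetic, and a running max) by a three-line recursion on the number with its last digit dropped: best(n) = max(drop-last(n), best(drop-last(n)) with the last digit re-appended).
import Mathlib
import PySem

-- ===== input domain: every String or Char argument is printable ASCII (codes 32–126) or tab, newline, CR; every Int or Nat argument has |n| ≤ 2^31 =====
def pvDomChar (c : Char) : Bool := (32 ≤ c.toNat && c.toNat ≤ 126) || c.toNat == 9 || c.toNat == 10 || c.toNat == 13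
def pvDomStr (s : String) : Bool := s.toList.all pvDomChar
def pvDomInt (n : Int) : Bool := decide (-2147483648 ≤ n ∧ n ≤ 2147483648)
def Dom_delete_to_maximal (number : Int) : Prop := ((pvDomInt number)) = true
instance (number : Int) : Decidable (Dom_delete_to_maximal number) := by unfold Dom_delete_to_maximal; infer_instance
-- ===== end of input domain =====

-- B replaces A's iterative enumeration of every delete-one-digit candidate (tracked
-- with a growing power and a running max) by a direct recursion on number // 10;
-- objective: simpler (shorter, no power/result bookkeeping), same O(digits) cost.

-- ===== PORT A =====
-- A's while loop: state (result, power); the positivity proof argument only certifies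
-- termination and does not alter the computation.
def pvLoopA (number result power : Int) (hp : 0 < power) : Int :=
  if h : PySem.Int.floordiv number power > 0 then
    let candidate := PySem.Int.floordiv number (power * 10) * power + PySem.Int.mod number power
    pvLoopA number (if result < candidate then candidate else result) (power * 10)
      (by positivity)
  else
    result
termination_by (PySem.Int.floordiv number power).toNat
decreasing_by
  rw [PySem.Int.floordiv_eq_ediv_of_pos hp] at h ⊢
  rw [PySem.Int.floordiv_eq_ediv_of_pos (by positivity),
    ← Int.ediv_ediv_of_nonneg (le_of_lt hp)]
  omega

def delete_to_maximal (number : Int) : Int := pvLoopA number 0 1 (by norm_num)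

-- ===== PORT B =====
def delete_to_maximal_alt (number : Int) : Int :=
  if number < 10 then 0
  else
    max (PySem.Int.floordiv number 10)
      (delete_to_maximal_alt (PySem.Int.floordiv number 10) * 10 + PySem.Int.mod number 10)
termination_by number.toNat
decreasing_by
  rw [PySem.Int.floordiv_eq_ediv_of_pos (by norm_num)]
  omega

-- ===== PRECONDITION & SPEC =====
def Spec_delete_to_maximal (number : Int) (out : Int) : Prop := out = delete_to_maximal_alt number
instance (number : Int) (out : Int) : Decidable (Spec_delete_to_maximal number out) := by unfold Spec_delete_to_maximal; infer_instance

-- ===== CLAIM (what is proved, stated in full; the proofs are below) =====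
def Claim_equal_delete_to_maximal : Prop := ∀ (number : Int), Dom_delete_to_maximal number → Spec_delete_to_maximal number (delete_to_maximal number)

-- ===== LEMMAS AND PROOFS =====

lemma alt_nonneg (n : Int) : 0 ≤ delete_to_maximal_alt n := by
  rw [delete_to_maximal_alt]
  split_ifs with h
  · exact le_refl 0
  · refine le_trans ?_ (le_max_left _ _)
    rw [PySem.Int.floordiv_eq_ediv_of_pos (by norm_num)]
    exact Int.ediv_nonneg (by omega) (by norm_num)

-- decompose n = m * p + r (0 ≤ r < p): floor-division facts for a positive divisor
lemma fdiv_decomp {m p r : Int} (hp : 0 < p) (hr0 : 0 ≤ r) (hrp : r < p) :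
    PySem.Int.floordiv (m * p + r) p = m ∧ PySem.Int.mod (m * p + r) p = r := by
  rw [PySem.Int.floordiv_eq_ediv_of_pos hp, PySem.Int.mod_eq_emod_of_pos hp,
    show m * p + r = r + m * p by ring]
  constructor
  · rw [Int.add_mul_ediv_right _ _ (by omega : p ≠ 0),
      Int.ediv_eq_zero_of_lt hr0 hrp, zero_add]
  · rw [show (r + m * p) % p = r % p by simp, Int.emod_eq_of_lt hr0 hrp]

-- max distributes through the monotone map x ↦ x * p + r (0 ≤ p)
lemma max_mul_add (a b p r : Int) (hp : 0 ≤ p) :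
    max a b * p + r = max (a * p + r) (b * p + r) := by
  rcases le_total a b with h | h
  · rw [max_eq_right h, max_eq_right (by nlinarith)]
  · rw [max_eq_left h, max_eq_left (by nlinarith)]

lemma ite_lt_eq_max (a b : Int) : (if a < b then b else a) = max a b := by
  rcases lt_or_ge a b with h | h
  · rw [if_pos h, max_eq_right (le_of_lt h)]
  · rw [if_neg (not_lt.mpr h), max_eq_left h]

-- main invariant: for n = m*p + r (0 < m, 0 ≤ r < p, 0 ≤ res), the loop started
-- at power p computes max res (delete_to_maximal_alt m * p + r)
lemma loopA_char (k : Nat) : ∀ m : Int, m.toNat ≤ k → 0 < m →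
    ∀ p r res : Int, 0 ≤ r → r < p → 0 ≤ res →
    (hp : 0 < p) → pvLoopA (m * p + r) res p hp = max res (delete_to_maximal_alt m * p + r) := by
  induction k with
  | zero => intro m hm hmpos; omega
  | succ k ih =>
    intro m hm hmpos p r res hr0 hrp hres hp
    set m' : Int := m / 10 with hm'
    set d : Int := m % 10 with hd
    have hmd : m = 10 * m' + d := by omega
    have hd0 : 0 ≤ d := by omega
    have hd10 : d < 10 := by omega
    have hn : m * p + r = m' * (p * 10) + (d * p + r) := by rw [hmd]; ring
    have hs0 : 0 ≤ d * p + r := by positivity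
    have hsp : d * p + r < p * 10 := by nlinarith
    have hfd : PySem.Int.floordiv (m * p + r) p = m := (fdiv_decomp hp hr0 hrp).1
    have hmod : PySem.Int.mod (m * p + r) p = r := (fdiv_decomp hp hr0 hrp).2
    have hfd10 : PySem.Int.floordiv (m * p + r) (p * 10) = m' := by
      rw [hn]; exact (fdiv_decomp (by positivity) hs0 hsp).1
    rw [pvLoopA, dif_pos (by rw [hfd]; exact hmpos)]
    simp only [hfd10, hmod, ite_lt_eq_max]
    rcases lt_or_ge m 10 with hlt | hge
    · -- single digit: m' = 0, the next loop test fails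
      have hmz : m' = 0 := by omega
      rw [pvLoopA, dif_neg (by rw [hn, (fdiv_decomp (by positivity) hs0 hsp).1, hmz]; omega)]
      rw [delete_to_maximal_alt, if_pos hlt, hmz]
    · -- m ≥ 10: apply the induction hypothesis at m' with power p * 10
      have hm'pos : 0 < m' := by omega
      have hm'k : m'.toNat ≤ k := by omega
      have halt : delete_to_maximal_alt m = max m' (delete_to_maximal_alt m' * 10 + d) := by
        rw [delete_to_maximal_alt, if_neg (not_lt.mpr hge),
          PySem.Int.floordiv_eq_ediv_of_pos (by norm_num : (0:Int) < 10),
          PySem.Int.mod_eq_emod_of_pos (by norm_num : (0:Int) < 10), ← hm', ← hd]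
      rw [hn, ih m' hm'k hm'pos (p * 10) (d * p + r) (max res (m' * p + r))
        hs0 hsp (le_trans hres (le_max_left _ _)) (by positivity)]
      rw [halt, max_mul_add _ _ p r (le_of_lt hp), ← max_assoc]
      congr 1
      ring

theorem equal_final : ∀ (number : Int), delete_to_maximal number = delete_to_maximal_alt number := by
  intro number
  unfold delete_to_maximal
  rcases le_or_gt number 0 with hle | hpos
  · rw [pvLoopA, dif_neg (by
      rw [show number = number * 1 + 0 by ring,
        (fdiv_decomp (by norm_num) (le_refl 0) (by norm_num)).1]; omega)]
    rw [delete_to_maximal_alt, if_pos (by omega)]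
  · have h := loopA_char number.toNat number (le_refl _) hpos 1 0 0
      (le_refl 0) (by norm_num) (le_refl 0) (by norm_num)
    simp only [mul_one, add_zero] at h
    rw [h, max_eq_right (alt_nonneg number)]

-- ===== VERDICT (by name: the statement is the Claim_ definition above) =====
theorem delete_to_maximal_spec : Claim_equal_delete_to_maximal := by
  intro number _
  unfold Spec_delete_to_maximal
  exact equal_final number
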